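-- pv_equiv track=rewrite | github.com/mozilla/crash-stop-addon | crashstop/datacollector.py | get_useful_bids
-- ===== SOURCE A (Python) =====
-- def get_useful_bids(buildhub_bids, socorro_bids):
--     """Get the useful nightly buildids.
--        The strategy is the following:
--          - keep the last builds (even if the volume is pretty low)
--          - remove the builds with a low volume of crashes
--            (they're erroneous or have been respined)
--     """
--     res = []
--     N = len(buildhub_bids)
--     n = -1
--
--     # first we keep the last elements: it doesn't matter
--     # if they have not enough crashes since at the beginning
--     # a build has almost no crashes.
--     for n in range(N - 1, -1, -1):
--         x = buildhub_bids[n]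
--         res.append(x)
--         # once we've a "true" build we can break...
--         if x[0] in socorro_bids:
--             break
--
--     # ... and this time add only "true" builds.
--     for i in range(n - 1, -1, -1):
--         x = buildhub_bids[i]
--         if x[0] in socorro_bids:
--             res.append(x)
--
--     return res[::-1]
-- ===== SOURCE B (Python) =====
-- def get_useful_bids(buildhub_bids, socorro_bids):
--     # last index of a "true" build; -1 means none, so everything is kept
--     m = -1
--     for i, x in enumerate(buildhub_bids):
--         if x[0] in socorro_bids:
--             m = i
--     return [x for i, x in enumerate(buildhub_bids) if i >= m or x[0] in socorro_bids]
-- ===== Notes on version B (the rewrite author's own statement) =====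
-- stated objective: simpler
-- what changed: Replaces A's two backward index loops with shared mutable loop variable n plus a final list reversal by one forward pass to find the last matching build index m (sentinel -1) and one forward comprehension keeping i >= m or matching builds, with no reversal.
import Mathlib
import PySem

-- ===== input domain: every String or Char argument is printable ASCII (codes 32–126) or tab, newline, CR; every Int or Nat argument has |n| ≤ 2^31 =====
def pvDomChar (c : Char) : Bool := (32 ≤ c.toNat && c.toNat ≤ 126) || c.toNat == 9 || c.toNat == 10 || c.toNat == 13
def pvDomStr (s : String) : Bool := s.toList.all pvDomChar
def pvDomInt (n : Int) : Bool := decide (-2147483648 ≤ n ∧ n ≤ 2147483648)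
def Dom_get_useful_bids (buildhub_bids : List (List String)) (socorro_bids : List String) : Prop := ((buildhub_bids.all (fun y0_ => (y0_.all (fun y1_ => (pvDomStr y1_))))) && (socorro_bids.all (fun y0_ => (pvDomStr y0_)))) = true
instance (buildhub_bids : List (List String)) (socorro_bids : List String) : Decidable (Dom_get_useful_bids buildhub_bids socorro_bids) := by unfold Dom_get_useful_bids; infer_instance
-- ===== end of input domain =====

-- B replaces A's two backward index loops plus final reversal by one forward scan for the
-- last matching index m (sentinel -1) and one forward filtered pass (objective: simpler).

-- ===== PORT A =====
-- first loop: walks indices k-1, k-2, …, 0, appending each build and stopping at a "true"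
-- build; returns the appended builds (in that descending order) and the final value of n
def guLoop1 (bids : List (List String)) (soc : List String) : Nat → List (List String) × Int
  | 0 => ([], 0)
  | k+1 =>
    let x := PySem.List.pyGetD bids (k : Int) []
    if soc.contains (PySem.List.pyGetD x 0 "") then ([x], (k : Int))
    else
      let r := guLoop1 bids soc k
      (x :: r.1, r.2)

-- second loop: for i in range(n-1, -1, -1), appending only "true" builds
def guLoop2 (bids : List (List String)) (soc : List String) : Nat → List (List String)
  | 0 => []
  | k+1 =>
    let x := PySem.List.pyGetD bids (k : Int) []
    if soc.contains (PySem.List.pyGetD x 0 "") then x :: guLoop2 bids soc k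
    else guLoop2 bids soc k

def get_useful_bids (buildhub_bids : List (List String)) (socorro_bids : List String) : List (List String) :=
  let r := guLoop1 buildhub_bids socorro_bids buildhub_bids.length
  (r.1 ++ guLoop2 buildhub_bids socorro_bids r.2.toNat).reverse

-- ===== PORT B =====
def get_useful_bids_alt (buildhub_bids : List (List String)) (socorro_bids : List String) : List (List String) :=
  let m : Int := (PySem.List.enumerate buildhub_bids 0).foldl
    (fun acc ix => if socorro_bids.contains (PySem.List.pyGetD ix.2 0 "") then ix.1 else acc) (-1)
  ((PySem.List.enumerate buildhub_bids 0).filter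
    (fun ix => decide (m ≤ ix.1) || socorro_bids.contains (PySem.List.pyGetD ix.2 0 ""))).map (·.2)

-- ===== PRECONDITION & SPEC =====
-- Pre_ excludes exactly the inputs containing an empty build entry, on which Python's x[0] raises IndexError
def Pre_get_useful_bids (buildhub_bids : List (List String)) (_socorro_bids : List String) : Prop :=
  ∀ x ∈ buildhub_bids, x ≠ []
instance (buildhub_bids : List (List String)) (socorro_bids : List String) : Decidable (Pre_get_useful_bids buildhub_bids socorro_bids) := by unfold Pre_get_useful_bids; infer_instance
def pvWitness_get_useful_bids : List (List String) × List String := ([["a"], ["b"], ["c"]], ["b"])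
def Spec_get_useful_bids (buildhub_bids : List (List String)) (socorro_bids : List String) (out : List (List String)) : Prop := out = get_useful_bids_alt buildhub_bids socorro_bids
instance (buildhub_bids : List (List String)) (socorro_bids : List String) (out : List (List String)) : Decidable (Spec_get_useful_bids buildhub_bids socorro_bids out) := by unfold Spec_get_useful_bids; infer_instance

-- ===== CLAIM (what is proved, stated in full; the proofs are below) =====
def Claim_equal_get_useful_bids : Prop := ∀ (buildhub_bids : List (List String)) (socorro_bids : List String), Dom_get_useful_bids buildhub_bids socorro_bids → Pre_get_useful_bids buildhub_bids socorro_bids → Spec_get_useful_bids buildhub_bids socorro_bids (get_useful_bids buildhub_bids socorro_bids)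

-- ===== LEMMAS AND PROOFS =====

-- the predicate "x[0] in socorro_bids" (with pyGetD's default, harmless since both ports use it)
def guP (soc : List String) (x : List String) : Bool := soc.contains (PySem.List.pyGetD x 0 "")

-- index of the last element of xs satisfying guP, none if there is none
def lastTrue (soc : List String) : List (List String) → Option Nat
  | [] => none
  | x :: xs =>
    match lastTrue soc xs with
    | some j => some (j + 1)
    | none => if guP soc x then some 0 else none

theorem lastTrue_lt_length (soc : List String) (xs : List (List String)) (m : Nat)
    (h : lastTrue soc xs = some m) : m < xs.length := by
  induction xs generalizing m with
  | nil => simp [lastTrue] at h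
  | cons x xs ih =>
    simp only [lastTrue] at h
    cases hx : lastTrue soc xs with
    | some j =>
      rw [hx] at h
      simp only [Option.some.injEq] at h
      have := ih j hx
      simp; omega
    | none =>
      rw [hx] at h
      by_cases hp : guP soc x = true
      · simp [hp] at h; simp; omega
      · simp [hp] at h

theorem lastTrue_append_singleton (soc : List String) (l : List (List String)) (x : List String) :
    lastTrue soc (l ++ [x]) = if guP soc x then some l.length else lastTrue soc l := by
  induction l with
  | nil => simp [lastTrue]
  | cons y l ih =>
    simp only [List.cons_append, lastTrue, ih]
    by_cases h : guP soc x = true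
    · simp [h]
    · simp [h]

theorem guLoop1_eq (bids : List (List String)) (soc : List String) (k : Nat) (hk : k ≤ bids.length) :
    guLoop1 bids soc k =
      match lastTrue soc (bids.take k) with
      | some m => (((bids.take k).drop m).reverse, (m : Int))
      | none => ((bids.take k).reverse, 0) := by
  induction k with
  | zero => simp [guLoop1, lastTrue]
  | succ k ih =>
    have hklt : k < bids.length := hk
    have hx : PySem.List.pyGetD bids (k : Int) [] = bids[k] := by
      rw [PySem.List.pyGetD_natCast]; simp [List.getD, hklt]
    have htake : bids.take (k + 1) = bids.take k ++ [bids[k]] := by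
      rw [List.take_add_one]; simp [hklt]
    have hlen : (bids.take k).length = k := List.length_take_of_le (le_of_lt hklt)
    rw [htake, lastTrue_append_singleton]
    simp only [guLoop1, hx]
    by_cases hp : PySem.List.pyGetD bids[k] 0 "" ∈ soc
    · simp only [guP, List.contains_eq_mem, hp, decide_true, if_pos]
      rw [List.drop_left]
      simp [hlen]
    · simp only [guP, List.contains_eq_mem, hp, decide_false, Bool.false_eq_true, if_false]
      rw [ih (le_of_lt hklt)]
      cases hlt : lastTrue soc (bids.take k) with
      | some m =>
        have hm : m < k := hlen ▸ lastTrue_lt_length soc _ m hlt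
        simp only
        rw [List.drop_append_of_le_length (by omega : m ≤ (bids.take k).length)]
        simp
      | none => simp only [List.reverse_append, List.reverse_cons, List.reverse_nil, List.nil_append, List.singleton_append]

theorem guLoop2_eq (bids : List (List String)) (soc : List String) (k : Nat) (hk : k ≤ bids.length) :
    guLoop2 bids soc k = ((bids.take k).filter (guP soc)).reverse := by
  induction k with
  | zero => simp [guLoop2]
  | succ k ih =>
    have hklt : k < bids.length := hk
    have hx : PySem.List.pyGetD bids (k : Int) [] = bids[k] := by
      rw [PySem.List.pyGetD_natCast]; simp [List.getD, hklt]
    have htake : bids.take (k + 1) = bids.take k ++ [bids[k]] := by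
      rw [List.take_add_one]; simp [hklt]
    rw [htake, List.filter_append]
    simp only [guLoop2, hx, ih (le_of_lt hklt), List.filter_cons]
    by_cases hp : PySem.List.pyGetD bids[k] 0 "" ∈ soc
    · simp [guP, hp]
    · simp [guP, hp]

theorem foldl_enum_eq (soc : List String) (xs : List (List String)) :
    ∀ (s acc : Int),
    (PySem.List.enumerate xs s).foldl
        (fun acc ix => if soc.contains (PySem.List.pyGetD ix.2 0 "") then ix.1 else acc) acc =
      match lastTrue soc xs with
      | some j => s + (j : Int)
      | none => acc := by
  induction xs with
  | nil => intro s acc; simp [PySem.List.enumerate_nil, lastTrue]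
  | cons x xs ih =>
    intro s acc
    rw [PySem.List.enumerate_cons, List.foldl_cons]
    simp only [lastTrue]
    rw [ih (s + 1)]
    cases h : lastTrue soc xs with
    | some j => simp only; push_cast; ring_nf
    | none =>
      by_cases hp : PySem.List.pyGetD x 0 "" ∈ soc
      · simp [guP, hp]
      · simp [guP, hp]

theorem filter_enum_ge (soc : List String) (xs : List (List String)) :
    ∀ (s m : Int), m ≤ s →
    ((PySem.List.enumerate xs s).filter
        (fun ix => decide (m ≤ ix.1) || soc.contains (PySem.List.pyGetD ix.2 0 ""))).map (·.2) = xs := by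
  induction xs with
  | nil => intro s m _; simp [PySem.List.enumerate_nil]
  | cons x xs ih =>
    intro s m hms
    rw [PySem.List.enumerate_cons, List.filter_cons]
    rw [if_pos (by simp [hms])]
    simp only [List.map_cons]
    rw [ih (s + 1) m (by omega)]

theorem filter_enum_eq (soc : List String) (xs : List (List String)) :
    ∀ (s m : Int),
    ((PySem.List.enumerate xs s).filter
        (fun ix => decide (m ≤ ix.1) || soc.contains (PySem.List.pyGetD ix.2 0 ""))).map (·.2) =
      (xs.take (m - s).toNat).filter (guP soc) ++ xs.drop (m - s).toNat := by
  induction xs with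
  | nil => intro s m; simp [PySem.List.enumerate_nil]
  | cons x xs ih =>
    intro s m
    by_cases hms : m ≤ s
    · have h0 : (m - s).toNat = 0 := by omega
      rw [h0]
      simpa using filter_enum_ge soc (x :: xs) s m hms
    · have ht : (m - s).toNat = (m - (s + 1)).toNat + 1 := by omega
      rw [ht]
      rw [PySem.List.enumerate_cons, List.filter_cons]
      simp only [List.take_succ_cons, List.drop_succ_cons, List.filter_cons]
      by_cases hp : PySem.List.pyGetD x 0 "" ∈ soc
      · rw [if_pos (by simp [hp])]
        simp only [List.map_cons]
        rw [ih (s + 1) m]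
        simp [guP, hp]
      · rw [if_neg (by simp [hp, hms])]
        rw [ih (s + 1) m]
        simp [guP, hp]

theorem main_eq (bids : List (List String)) (soc : List String) :
    get_useful_bids bids soc = get_useful_bids_alt bids soc := by
  unfold get_useful_bids get_useful_bids_alt
  rw [foldl_enum_eq soc bids 0 (-1)]
  rw [guLoop1_eq bids soc bids.length (le_refl _)]
  rw [List.take_length]
  cases h : lastTrue soc bids with
  | none =>
    simp only
    rw [filter_enum_ge soc bids 0 (-1) (by omega)]
    simp [guLoop2]
  | some j =>
    have hj : j < bids.length := lastTrue_lt_length soc bids j h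
    simp only [Int.toNat_natCast, zero_add]
    rw [guLoop2_eq bids soc j (le_of_lt hj)]
    rw [filter_enum_eq soc bids 0 (j : Int)]
    have hjj : ((j : Int) - 0).toNat = j := by omega
    rw [hjj]
    rw [List.reverse_append, List.reverse_reverse, List.reverse_reverse]

-- ===== VERDICT (by name: the statement is the Claim_ definition above) =====
theorem get_useful_bids_spec : Claim_equal_get_useful_bids := by
  intro bids soc _ _
  unfold Spec_get_useful_bids
  exact main_eq bids soc
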